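-- pv_equiv track=rewrite | github.com/Suldangoo/CodingTest | programmers/Level. 0/옹알이 (1).py | solution
-- ===== SOURCE A (Python) =====
-- def solution(babbling):
--     cant = 0 # 발음 불가능한 단어의 개수
--     two = ["ye", "ma"] # 두 글자의 옹알이
--     three = ["aya", "woo"] # 세 글자의 옹알이
--
--     # 한 단어씩 살펴보기
--     for ward in babbling :
--         while len(ward) : # ward 단어가 남아있다면 실행
--             # 1번 조건 : ward가 두 글자 이상이며, 두 글자의 옹알이를 포함할 경우 성공
--             if len(ward) >= 2 and ward[:2] in two :
--                 ward = ward[2:]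
--             # 2번 조건 : ward가 세 글자 이상이며, 세 글자의 옹알이를 포함할 경우
--             elif len(ward) >= 3 and ward[:3] in three :
--                 ward = ward[3:]
--             else :
--                 cant += 1
--                 break
--
--     return len(babbling) - cant # 총 단어의 개수에서 발음 실패한 단어를 빼기
-- ===== SOURCE B (Python) =====
-- def solution(babbling):
--     # Recursive backtracking matcher: a word is pronounceable iff it is a
--     # concatenation of allowed syllables; count matching words directly.
--     def ok(w):
--         return w == "" or any(w.startswith(s) and ok(w[len(s):]) for s in ("aya", "ye", "woo", "ma"))
--     return sum(1 for w in babbling if ok(w))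
-- ===== Notes on version B (the rewrite author's own statement) =====
-- stated objective: simpler
-- what changed: Replaces the greedy in-place prefix-stripping while-loop with failure counting and final subtraction by a recursive syllable matcher per word and a direct count of successes.
import Mathlib
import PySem

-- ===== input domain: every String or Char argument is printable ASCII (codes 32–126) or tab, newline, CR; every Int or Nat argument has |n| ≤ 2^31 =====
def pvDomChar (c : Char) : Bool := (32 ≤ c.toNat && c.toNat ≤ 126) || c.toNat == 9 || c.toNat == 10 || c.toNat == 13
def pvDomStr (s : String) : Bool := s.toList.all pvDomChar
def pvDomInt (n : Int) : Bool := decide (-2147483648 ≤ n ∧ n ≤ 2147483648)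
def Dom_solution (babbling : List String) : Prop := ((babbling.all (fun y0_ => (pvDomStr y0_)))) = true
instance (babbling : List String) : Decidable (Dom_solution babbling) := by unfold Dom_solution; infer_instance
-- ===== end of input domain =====

-- ===== PORT A =====
-- B changes: recursive syllable matcher per word + direct count of successes,
-- instead of A's greedy prefix-stripping while-loop with failure counting (objective: simpler).
-- Slices ward[:k]/ward[k:] with k ≥ 0 are ported exactly as List.take/List.drop.
def pvTwo : List (List Char) := [['y','e'], ['m','a']]
def pvThree : List (List Char) := [['a','y','a'], ['w','o','o']]

-- the inner `while len(ward):` loop of A: returns the contribution to `cant` (0 or 1)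
def aFail (w : List Char) : Int :=
  if w.length = 0 then 0
  else if 2 ≤ w.length ∧ w.take 2 ∈ pvTwo then aFail (w.drop 2)
  else if 3 ≤ w.length ∧ w.take 3 ∈ pvThree then aFail (w.drop 3)
  else 1
termination_by w.length
decreasing_by all_goals simp [List.length_drop]; omega

def solution (babbling : List String) : Int :=
  (babbling.length : Int) - babbling.foldl (fun cant ward => cant + aFail ward.toList) 0

-- ===== PORT B =====
-- `w.startswith(s) and ok(w[len(s):])` ported as `w.take |s| = s && okB (w.drop |s|)` (exact)
def okB (w : List Char) : Bool :=
  if w = [] then true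
  else
    (w.take 3 = ['a','y','a'] && okB (w.drop 3)) ||
    (w.take 2 = ['y','e'] && okB (w.drop 2)) ||
    (w.take 3 = ['w','o','o'] && okB (w.drop 3)) ||
    (w.take 2 = ['m','a'] && okB (w.drop 2))
termination_by w.length
decreasing_by all_goals simp [List.length_drop]; rcases w with _ | ⟨c, t⟩ <;> simp_all

def solution_alt (babbling : List String) : Int :=
  (babbling.map (fun w => if okB w.toList then (1 : Int) else 0)).sum

-- ===== PRECONDITION & SPEC =====
def Spec_solution (babbling : List String) (out : Int) : Prop := out = solution_alt babbling
instance (babbling : List String) (out : Int) : Decidable (Spec_solution babbling out) := by unfold Spec_solution; infer_instance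

-- ===== CLAIM (what is proved, stated in full; the proofs are below) =====
def Claim_equal_solution : Prop := ∀ (babbling : List String), Dom_solution babbling → Spec_solution babbling (solution babbling)

-- ===== LEMMAS AND PROOFS =====

theorem foldl_aFail (l : List String) (acc : Int) :
    l.foldl (fun cant ward => cant + aFail ward.toList) acc
      = acc + (l.map (fun w => aFail w.toList)).sum := by
  induction l generalizing acc with
  | nil => simp
  | cons w l ih => simp [ih]; ring

-- per-word agreement: A's failure flag is the negation of B's matcher
theorem aFail_eq_okB (w : List Char) : aFail w = if okB w then 0 else 1 := by
  generalize hn : w.length = n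
  induction n using Nat.strong_induction_on generalizing w with
  | _ n ih =>
  subst hn
  rcases w with _ | ⟨a, t⟩
  · rw [aFail, okB]; simp
  rw [aFail, okB]
  rcases t with _ | ⟨b, t⟩
  · simp [pvTwo, pvThree]
  by_cases h1 : a = 'y' ∧ b = 'e'
  · obtain ⟨rfl, rfl⟩ := h1
    have := ih t.length (by simp) t rfl
    simp [pvTwo, this]
  by_cases h2 : a = 'm' ∧ b = 'a'
  · obtain ⟨rfl, rfl⟩ := h2
    have := ih t.length (by simp) t rfl
    simp [pvTwo, this]
  rcases t with _ | ⟨c, t⟩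
  · simp [pvTwo, pvThree, h1, h2]
  by_cases h3 : a = 'a' ∧ b = 'y' ∧ c = 'a'
  · obtain ⟨rfl, rfl, rfl⟩ := h3
    have := ih t.length (by simp; omega) t rfl
    simp [pvTwo, pvThree, this]
  by_cases h4 : a = 'w' ∧ b = 'o' ∧ c = 'o'
  · obtain ⟨rfl, rfl, rfl⟩ := h4
    have := ih t.length (by simp; omega) t rfl
    simp [pvTwo, pvThree, this]
  · simp [pvTwo, pvThree, h1, h2, h3, h4]

theorem sum_split (l : List String) :
    (l.length : Int) - l.foldl (fun cant ward => cant + aFail ward.toList) 0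
      = (l.map (fun w => if okB w.toList then (1 : Int) else 0)).sum := by
  induction l with
  | nil => simp
  | cons w l ih =>
    rw [List.foldl_cons, foldl_aFail, List.map_cons, List.sum_cons]
    rw [foldl_aFail] at ih
    rw [aFail_eq_okB] at *
    simp only [List.length_cons]
    push_cast
    split_ifs <;> omega

theorem solution_spec : Claim_equal_solution := by
  intro babbling _
  unfold Spec_solution solution solution_alt
  exact sum_split babbling
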